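-- pv_equiv track=rewrite | github.com/wongrp/chemotaxis_tracker | iou.py | unmatched
-- ===== SOURCE A (Python) =====
-- def unmatched(box_current, box_prev, row_ind, col_ind):
--     unmatched_current = []
--     unmatched_prev = []
--     for ind, i in enumerate(box_current):
--         if ind not in row_ind:
--             unmatched_current.append(ind)
--
--     for ind, i in enumerate(box_prev):
--         if ind not in col_ind:
--             unmatched_prev.append(ind)
--     return unmatched_current, unmatched_prev
-- ===== SOURCE B (Python) =====
-- def unmatched(box_current, box_prev, row_ind, col_ind):
--     unmatched_current = sorted(set(range(len(box_current))) - set(row_ind))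
--     unmatched_prev = sorted(set(range(len(box_prev))) - set(col_ind))
--     return unmatched_current, unmatched_prev
-- ===== Notes on version B (the rewrite author's own statement) =====
-- stated objective: faster
-- what changed: Replaces each enumerate loop that tests 'ind not in row_ind' per index by a set difference over the index range followed by a sort, removing the inner linear membership scan.
import Mathlib
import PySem

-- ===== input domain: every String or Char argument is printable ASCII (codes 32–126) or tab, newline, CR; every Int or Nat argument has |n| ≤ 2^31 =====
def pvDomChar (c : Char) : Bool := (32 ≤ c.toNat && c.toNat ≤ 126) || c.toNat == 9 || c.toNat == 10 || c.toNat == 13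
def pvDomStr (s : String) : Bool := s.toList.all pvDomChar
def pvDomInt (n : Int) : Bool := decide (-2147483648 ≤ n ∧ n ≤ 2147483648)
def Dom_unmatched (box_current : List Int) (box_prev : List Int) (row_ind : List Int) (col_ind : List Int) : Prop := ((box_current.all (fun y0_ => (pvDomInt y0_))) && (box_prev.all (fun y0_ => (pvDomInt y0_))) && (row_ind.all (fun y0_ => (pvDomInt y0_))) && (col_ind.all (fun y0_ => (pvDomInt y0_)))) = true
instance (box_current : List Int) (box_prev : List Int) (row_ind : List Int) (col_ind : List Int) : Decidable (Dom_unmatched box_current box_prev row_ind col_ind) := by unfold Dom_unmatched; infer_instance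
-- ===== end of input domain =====

-- B replaces each enumerate-and-test loop by a set difference over the index range plus a sort (simpler).
-- ===== PORT A =====
def unmatched (box_current : List Int) (box_prev : List Int) (row_ind : List Int) (col_ind : List Int) : List Int × List Int :=
  let unmatched_current :=
    (PySem.List.enumerate box_current 0).foldl
      (fun acc p => if p.1 ∈ row_ind then acc else acc ++ [p.1]) []
  let unmatched_prev :=
    (PySem.List.enumerate box_prev 0).foldl
      (fun acc p => if p.1 ∈ col_ind then acc else acc ++ [p.1]) []
  (unmatched_current, unmatched_prev)

-- ===== PORT B =====
def unmatched_alt (box_current : List Int) (box_prev : List Int) (row_ind : List Int) (col_ind : List Int) : List Int × List Int :=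
  let unmatched_current :=
    PySem.List.sorted
      (PySem.Set.diff (PySem.Set.ofList (PySem.List.pyRange 0 box_current.length 1))
        (PySem.Set.ofList row_ind)) (fun x => x) false
  let unmatched_prev :=
    PySem.List.sorted
      (PySem.Set.diff (PySem.Set.ofList (PySem.List.pyRange 0 box_prev.length 1))
        (PySem.Set.ofList col_ind)) (fun x => x) false
  (unmatched_current, unmatched_prev)

-- ===== PRECONDITION & SPEC =====
def Spec_unmatched (box_current : List Int) (box_prev : List Int) (row_ind : List Int) (col_ind : List Int) (out : List Int × List Int) : Prop := out = unmatched_alt box_current box_prev row_ind col_ind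
instance (box_current : List Int) (box_prev : List Int) (row_ind : List Int) (col_ind : List Int) (out : List Int × List Int) : Decidable (Spec_unmatched box_current box_prev row_ind col_ind out) := by unfold Spec_unmatched; infer_instance

-- ===== CLAIM (what is proved, stated in full; the proofs are below) =====
def Claim_equal_unmatched : Prop := ∀ (box_current : List Int) (box_prev : List Int) (row_ind : List Int) (col_ind : List Int), Dom_unmatched box_current box_prev row_ind col_ind → Spec_unmatched box_current box_prev row_ind col_ind (unmatched box_current box_prev row_ind col_ind)

-- ===== LEMMAS AND PROOFS =====

-- ===== VERDICT (by name: the statement is the Claim_ definition above) =====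
-- A's append-unless-member loop is the filter of the index list
theorem foldl_notmem_filter (inds : List Int) (l acc : List Int) :
    l.foldl (fun acc i => if i ∈ inds then acc else acc ++ [i]) acc
      = acc ++ l.filter (fun i => i ∉ inds) := by
  induction l generalizing acc with
  | nil => simp
  | cons x t ih =>
    by_cases hx : x ∈ inds <;> simp [hx, ih, List.append_assoc]

-- one side: A's filter-loop over enumerate equals B's sorted set-difference
theorem unmatched_side (xs : List Int) (inds : List Int) :
    (PySem.List.enumerate xs 0).foldl
      (fun acc p => if p.1 ∈ inds then acc else acc ++ [p.1]) [] =
    PySem.List.sorted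
      (PySem.Set.diff (PySem.Set.ofList (PySem.List.pyRange 0 xs.length 1))
        (PySem.Set.ofList inds)) (fun x => x) false := by
  have hmap :
      (PySem.List.enumerate xs 0).foldl
        (fun acc p => if p.1 ∈ inds then acc else acc ++ [p.1]) [] =
      ((PySem.List.enumerate xs 0).map Prod.fst).foldl
        (fun acc i => if i ∈ inds then acc else acc ++ [i]) [] := by
    rw [List.foldl_map]
  rw [hmap, PySem.List.map_fst_enumerate]
  simp only [zero_add]
  rw [foldl_notmem_filter, List.nil_append]
  set r := PySem.List.pyRange 0 (xs.length : Int) 1 with hr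
  have hflt : (r.filter (fun i => i ∉ inds)).Pairwise (fun a b : Int => a < b) :=
    (PySem.List.pairwise_lt_pyRange_one 0 (xs.length : Int)).filter _
  refine (PySem.List.sorted_eq_of_perm_of_pairwise_lt _ _ _ ?_ hflt).symm
  refine (List.perm_ext_iff_of_nodup ?_ ?_).2 ?_
  · exact (PySem.List.nodup_pyRange_one 0 (xs.length : Int)).filter _
  · exact PySem.Set.nodup_diff _ _ (PySem.Set.nodup_ofList _)
  · intro a
    simp [PySem.Set.mem_diff, PySem.Set.mem_ofList, List.mem_filter]

theorem unmatched_spec : Claim_equal_unmatched := by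
  intro bc bp r c _
  unfold Spec_unmatched unmatched unmatched_alt
  simp only [unmatched_side]
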